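-- pv_equiv track=rewrite | github.com/codejoydo/Semester_5 | dbs/undo.py | splitT
-- ===== SOURCE A (Python) =====
-- def splitT(T):
--     final = []
--     temp = []
--     n = 0
--     for i in T:
--         if "Transaction" in i:
--             if len(temp) > 0:
--                 final.append(temp)
--             temp = []
--             n+=1
--             temp.append(i.strip())
--         else:
--             temp.append(i.strip())
--     final.append(temp)
--     return final, n
-- ===== SOURCE B (Python) =====
-- def splitT(T):
--     stripped = [i.strip() for i in T]
--     marks = [idx for idx, i in enumerate(T) if "Transaction" in i]
--     n = len(marks)
--     if not marks:
--         return [stripped], n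
--     groups = [stripped[a:b] for a, b in zip(marks, marks[1:] + [len(stripped)])]
--     if marks[0] > 0:
--         groups = [stripped[:marks[0]]] + groups
--     return groups, n
-- ===== Notes on version B (the rewrite author's own statement) =====
-- stated objective: alternative
-- what changed: Replaces the incremental single-pass accumulator (temp/final rebuilt element by element) with an index table of marker positions plus slicing: stripped list and marker indices are built first, then the groups are cut out as slices between consecutive markers.
import Mathlib
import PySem

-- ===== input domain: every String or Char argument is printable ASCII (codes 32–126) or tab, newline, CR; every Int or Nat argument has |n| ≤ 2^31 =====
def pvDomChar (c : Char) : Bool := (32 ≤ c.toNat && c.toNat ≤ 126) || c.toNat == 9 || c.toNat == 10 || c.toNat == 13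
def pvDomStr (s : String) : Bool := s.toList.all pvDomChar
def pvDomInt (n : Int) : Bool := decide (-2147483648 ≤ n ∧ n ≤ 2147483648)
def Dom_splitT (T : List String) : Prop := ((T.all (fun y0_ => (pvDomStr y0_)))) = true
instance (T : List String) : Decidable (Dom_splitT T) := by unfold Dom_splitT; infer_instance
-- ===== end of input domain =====

-- B replaces A's incremental accumulator loop with a marker-index table plus slicing (alternative decomposition, similar cost).


-- ===== PORT A =====
-- loop body of A: state (final, temp, n)
def stepA (acc : List (List String) × List String × Int) (i : String) :
    List (List String) × List String × Int :=
  if PySem.Str.isIn "Transaction" i then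
    ((if acc.2.1.length > 0 then acc.1 ++ [acc.2.1] else acc.1),
     [PySem.Str.strip i], acc.2.2 + 1)
  else
    (acc.1, acc.2.1 ++ [PySem.Str.strip i], acc.2.2)

def splitT (T : List String) : List (List String) × Int :=
  let st := T.foldl stepA ([], [], 0)
  (st.1 ++ [st.2.1], st.2.2)

-- ===== PORT B =====
def splitT_alt (T : List String) : List (List String) × Int :=
  let stripped := T.map PySem.Str.strip
  let marks := (PySem.List.enumerate T).filterMap
      (fun p => if PySem.Str.isIn "Transaction" p.2 then some p.1 else none)
  let n : Int := marks.length
  match marks with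
  | [] => ([stripped], n)
  | m :: rest =>
      let groups := ((m :: rest).zip (rest ++ [(stripped.length : Int)])).map
          (fun p => PySem.List.slice stripped (some p.1) (some p.2))
      let groups := if 0 < m then PySem.List.slice stripped none (some m) :: groups else groups
      (groups, n)

-- ===== PRECONDITION & SPEC =====
def Spec_splitT (T : List String) (out : List (List String) × Int) : Prop := out = splitT_alt T
instance (T : List String) (out : List (List String) × Int) : Decidable (Spec_splitT T out) := by unfold Spec_splitT; infer_instance

-- ===== CLAIM (what is proved, stated in full; the proofs are below) =====
def Claim_equal_splitT : Prop := ∀ (T : List String), Dom_splitT T → Spec_splitT T (splitT T)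

-- ===== LEMMAS AND PROOFS =====

-- marker positions (as natural numbers), counted from offset k
def marksNatAux : List String → Nat → List Nat
  | [], _ => []
  | i :: T, k =>
      if PySem.Str.isIn "Transaction" i then k :: marksNatAux T (k + 1)
      else marksNatAux T (k + 1)

def marksNat (T : List String) : List Nat := marksNatAux T 0

-- closed-form description of A's loop state after processing T
def leadOf (s : List String) (m : Nat) : List (List String) :=
  if 0 < m then [s.take m] else []

def innerOf (s : List String) (m : Nat) (rest : List Nat) : List (List String) :=
  ((m :: rest).zip rest).map (fun p => (s.drop p.1).take (p.2 - p.1))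

def stateSpec (T : List String) : List (List String) × List String × Int :=
  match marksNat T with
  | [] => ([], T.map PySem.Str.strip, 0)
  | m :: rest =>
      (leadOf (T.map PySem.Str.strip) m ++ innerOf (T.map PySem.Str.strip) m rest,
       (T.map PySem.Str.strip).drop ((m :: rest).getLast (by simp)),
       ((m :: rest).length : Int))

theorem marksNatAux_lt (T : List String) : ∀ (k : Nat), ∀ j ∈ marksNatAux T k, j < k + T.length := by
  induction T with
  | nil => intro k j hj; simp [marksNatAux] at hj
  | cons i T ih =>
      intro k j hj
      cases hi : PySem.Str.isIn "Transaction" i <;>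
        rw [marksNatAux, hi] at hj
      · have := ih (k + 1) j hj; simp only [List.length_cons]; omega
      · simp only [if_true, List.mem_cons] at hj
        rcases hj with rfl | hj
        · simp only [List.length_cons]; omega
        · have := ih (k + 1) j hj; simp only [List.length_cons]; omega

theorem marksNat_lt (T : List String) : ∀ j ∈ marksNat T, j < T.length := by
  intro j hj
  have := marksNatAux_lt T 0 j hj
  omega

theorem marksNatAux_append (T : List String) (x : String) : ∀ (k : Nat),
    marksNatAux (T ++ [x]) k =
      marksNatAux T k ++
        (if PySem.Str.isIn "Transaction" x then [k + T.length] else []) := by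
  induction T with
  | nil =>
      intro k
      cases hx : PySem.Str.isIn "Transaction" x <;>
        simp only [List.nil_append, marksNatAux, hx] <;> simp
  | cons i T ih =>
      intro k
      have hrec := ih (k + 1)
      rw [show k + 1 + T.length = k + (T.length + 1) by omega] at hrec
      cases hi : PySem.Str.isIn "Transaction" i <;>
        rw [List.cons_append, marksNatAux, hi, marksNatAux, hi, hrec] <;>
        simp

theorem marksNat_append (T : List String) (x : String) :
    marksNat (T ++ [x]) =
      marksNat T ++ (if PySem.Str.isIn "Transaction" x then [T.length] else []) := by
  have := marksNatAux_append T x 0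
  simpa [marksNat] using this

theorem marks_enum_eq_map_cast (T : List String) : ∀ (k : Nat),
    (PySem.List.enumerate T (k : Int)).filterMap
        (fun p => if PySem.Str.isIn "Transaction" p.2 then some p.1 else none)
      = (marksNatAux T k).map (fun (j : Nat) => (j : Int)) := by
  induction T with
  | nil => intro k; simp [PySem.List.enumerate_nil, marksNatAux]
  | cons i T ih =>
      intro k
      have hrec := ih (k + 1)
      rw [PySem.List.enumerate_cons, List.filterMap_cons,
        show ((k : Int) + 1) = ((k + 1 : Nat) : Int) by push_cast; ring]
      simp only [marksNatAux]
      cases hi : PySem.Str.isIn "Transaction" i <;>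
        simp only [hi, Bool.false_eq_true, if_false, if_true, List.map_cons] <;>
        rw [hrec] <;> try rfl

theorem marks_eq_map_cast (T : List String) :
    (PySem.List.enumerate T).filterMap
        (fun p => if PySem.Str.isIn "Transaction" p.2 then some p.1 else none)
      = (marksNat T).map (fun (j : Nat) => (j : Int)) := by
  simpa using marks_enum_eq_map_cast T 0

-- consecutive pairs of l with a sentinel appended at the end
theorem zip_tail_append {α : Type} (l : List α) (e : α) (h : l ≠ []) :
    l.zip (l.tail ++ [e]) = l.zip l.tail ++ [((l.getLast h), e)] := by
  induction l with
  | nil => exact absurd rfl h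
  | cons a t ih =>
      cases t with
      | nil => simp
      | cons b t' =>
          have hrec := ih (by simp)
          simp only [List.tail_cons] at hrec ⊢
          rw [List.cons_append, List.zip_cons_cons, hrec]
          simp [List.getLast]

theorem pairs_append {α : Type} (l : List α) (e : α) (h : l ≠ []) :
    (l ++ [e]).zip (l.tail ++ [e]) = l.zip l.tail ++ [((l.getLast h), e)] := by
  induction l with
  | nil => exact absurd rfl h
  | cons a t ih =>
      cases t with
      | nil => simp
      | cons b t' =>
          have hrec := ih (by simp)
          simp only [List.tail_cons] at hrec ⊢
          rw [List.cons_append] at hrec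
          rw [List.cons_append, List.cons_append, List.zip_cons_cons, hrec]
          simp [List.getLast]

-- take/drop through an append, with bounds
theorem take_app {α : Type} (s t : List α) (m : Nat) (hm : m ≤ s.length) :
    (s ++ t).take m = s.take m := by
  rw [List.take_append, Nat.sub_eq_zero_of_le hm]
  simp

theorem drop_app {α : Type} (s t : List α) (m : Nat) (hm : m ≤ s.length) :
    (s ++ t).drop m = s.drop m ++ t := by
  rw [List.drop_append, Nat.sub_eq_zero_of_le hm]
  simp

theorem drop_take_app {α : Type} (s t : List α) (a b : Nat)
    (ha : a ≤ s.length) (hb : b ≤ s.length) :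
    ((s ++ t).drop a).take (b - a) = (s.drop a).take (b - a) := by
  rw [drop_app s t a ha, take_app (s.drop a) t (b - a) (by simp; omega)]

theorem drop_last_take {α : Type} (s t : List α) (a : Nat) (ha : a ≤ s.length) :
    ((s ++ t).drop a).take (s.length - a) = s.drop a := by
  rw [drop_app s t a ha, take_app (s.drop a) t (s.length - a) (by simp),
    show s.length - a = (s.drop a).length by simp, List.take_length]

theorem stateSpec_nil {T : List String} (h : marksNat T = []) :
    stateSpec T = ([], T.map PySem.Str.strip, 0) := by
  unfold stateSpec
  split
  · rfl
  · rename_i m rest heq; rw [h] at heq; cases heq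

theorem stateSpec_cons {T : List String} {m : Nat} {rest : List Nat}
    (h : marksNat T = m :: rest) :
    stateSpec T =
      (leadOf (T.map PySem.Str.strip) m ++ innerOf (T.map PySem.Str.strip) m rest,
       (T.map PySem.Str.strip).drop ((m :: rest).getLast (by simp)),
       ((m :: rest).length : Int)) := by
  unfold stateSpec
  split
  · rename_i heq; rw [h] at heq; cases heq
  · rename_i m' rest' heq; rw [h] at heq; cases heq; rfl

theorem getLast_snoc {α : Type} (l : List α) (e : α) (h : l ++ [e] ≠ []) :
    (l ++ [e]).getLast h = e := by
  induction l with
  | nil => rfl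
  | cons a t ih =>
      show (a :: (t ++ [e])).getLast (by simp) = e
      rw [List.getLast_cons (by simp : t ++ [e] ≠ [])]
      exact ih (by simp)

theorem pairs_cons_snoc {α : Type} (m : α) (rest : List α) (e : α) :
    (m :: (rest ++ [e])).zip (rest ++ [e]) =
      (m :: rest).zip rest ++ [((m :: rest).getLast (by simp), e)] := by
  have := pairs_append (m :: rest) e (by simp)
  simpa using this

theorem zip_tail_snoc {α : Type} (m : α) (rest : List α) (e : α) :
    (m :: rest).zip (rest ++ [e]) =
      (m :: rest).zip rest ++ [((m :: rest).getLast (by simp), e)] := by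
  have := zip_tail_append (m :: rest) e (by simp)
  simpa using this

theorem step_stateSpec (T : List String) (x : String) :
    stepA (stateSpec T) x = stateSpec (T ++ [x]) := by
  have hLs : (T.map PySem.Str.strip).length = T.length := by simp
  have hsx : (T ++ [x]).map PySem.Str.strip
      = T.map PySem.Str.strip ++ [PySem.Str.strip x] := by simp
  cases hx : PySem.Str.isIn "Transaction" x
  · -- x is not a marker line
    cases h : marksNat T with
    | nil =>
        have h' : marksNat (T ++ [x]) = [] := by rw [marksNat_append, h, hx]; simp
        rw [stateSpec_nil h, stateSpec_nil h', hsx]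
        simp only [stepA, hx, Bool.false_eq_true, if_false]
    | cons m rest =>
        have h' : marksNat (T ++ [x]) = m :: rest := by rw [marksNat_append, h, hx]; simp
        rw [stateSpec_cons h, stateSpec_cons h', hsx]
        have hm0 : m ≤ (T.map PySem.Str.strip).length := by
          rw [hLs]
          exact Nat.le_of_lt (marksNat_lt T m (by rw [h]; exact List.mem_cons_self))
        have hlast : (m :: rest).getLast (by simp) ≤ (T.map PySem.Str.strip).length := by
          rw [hLs]
          exact Nat.le_of_lt (marksNat_lt T _ (by rw [h]; exact List.getLast_mem (by simp)))
        simp only [stepA, hx, Bool.false_eq_true, if_false, Prod.mk.injEq]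
        refine ⟨?_, ?_, trivial⟩
        · congr 1
          · unfold leadOf
            rw [take_app _ _ m hm0]
          · unfold innerOf
            refine List.map_congr_left ?_
            rintro ⟨a, b⟩ hp
            obtain ⟨h1, h2⟩ := List.of_mem_zip hp
            have ha : a ≤ (T.map PySem.Str.strip).length := by
              rw [hLs]; exact Nat.le_of_lt (marksNat_lt T a (by rw [h]; exact h1))
            have hb : b ≤ (T.map PySem.Str.strip).length := by
              rw [hLs]
              exact Nat.le_of_lt (marksNat_lt T b (by rw [h]; exact List.mem_cons_of_mem _ h2))
            exact (drop_take_app _ _ a b ha hb).symm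
        · rw [drop_app _ _ _ hlast]
  · -- x is a marker line
    cases h : marksNat T with
    | nil =>
        have h' : marksNat (T ++ [x]) = [T.length] := by rw [marksNat_append, h, hx]; simp
        rw [stateSpec_nil h, stateSpec_cons h', hsx]
        simp only [stepA, hx, if_true, Prod.mk.injEq]
        refine ⟨?_, ?_, by norm_num⟩
        · unfold leadOf innerOf
          simp only [List.zip_nil_right, List.map_nil, List.append_nil]
          rw [take_app _ _ _ hLs.ge,
            show T.length = (T.map PySem.Str.strip).length from hLs.symm, List.take_length]
          simp [gt_iff_lt]
        · rw [List.getLast_singleton,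
            show T.length = (T.map PySem.Str.strip).length from hLs.symm,
            drop_app _ _ _ (Nat.le_refl _), List.drop_length, List.nil_append]
    | cons m rest =>
        have h' : marksNat (T ++ [x]) = m :: (rest ++ [T.length]) := by
          rw [marksNat_append, h, hx]; simp
        rw [stateSpec_cons h, stateSpec_cons h', hsx]
        have hm0 : m ≤ (T.map PySem.Str.strip).length := by
          rw [hLs]
          exact Nat.le_of_lt (marksNat_lt T m (by rw [h]; exact List.mem_cons_self))
        have hlastlt : (m :: rest).getLast (by simp) < T.length :=
          marksNat_lt T _ (by rw [h]; exact List.getLast_mem (by simp))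
        have htemp :
            ((T.map PySem.Str.strip).drop ((m :: rest).getLast (by simp))).length > 0 := by
          rw [List.length_drop, hLs]; omega
        simp only [stepA, hx, if_true, if_pos htemp, Prod.mk.injEq]
        refine ⟨?_, ?_, ?_⟩
        · unfold leadOf innerOf
          rw [pairs_cons_snoc, List.map_append, List.map_cons, List.map_nil]
          rw [take_app _ _ m hm0]
          have hlastslice :
              (((T.map PySem.Str.strip ++ [PySem.Str.strip x]).drop
                  ((m :: rest).getLast (by simp))).take
                (T.length - (m :: rest).getLast (by simp)))
              = (T.map PySem.Str.strip).drop ((m :: rest).getLast (by simp)) := by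
            rw [show T.length = (T.map PySem.Str.strip).length from hLs.symm]
            exact drop_last_take _ _ _ (by rw [hLs]; omega)
          rw [hlastslice]
          have hinner :
              ((m :: rest).zip rest).map
                  (fun p => ((T.map PySem.Str.strip ++ [PySem.Str.strip x]).drop p.1).take
                    (p.2 - p.1))
                = ((m :: rest).zip rest).map
                    (fun p => ((T.map PySem.Str.strip).drop p.1).take (p.2 - p.1)) := by
            refine List.map_congr_left ?_
            rintro ⟨a, b⟩ hp
            obtain ⟨h1, h2⟩ := List.of_mem_zip hp
            have ha : a ≤ (T.map PySem.Str.strip).length := by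
              rw [hLs]; exact Nat.le_of_lt (marksNat_lt T a (by rw [h]; exact h1))
            have hb : b ≤ (T.map PySem.Str.strip).length := by
              rw [hLs]
              exact Nat.le_of_lt (marksNat_lt T b (by rw [h]; exact List.mem_cons_of_mem _ h2))
            exact drop_take_app _ _ a b ha hb
          rw [hinner, List.append_assoc]
        · have hg : (m :: (rest ++ [T.length])).getLast (by simp) = T.length := by
            have := getLast_snoc (m :: rest) T.length (by simp)
            simpa using this
          rw [hg, show T.length = (T.map PySem.Str.strip).length from hLs.symm,
            drop_app _ _ _ (Nat.le_refl _), List.drop_length, List.nil_append]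
        · simp only [List.length_cons, List.length_append, List.length_nil]
          push_cast
          ring

theorem foldA_char (T : List String) : T.foldl stepA ([], [], 0) = stateSpec T := by
  induction T using List.reverseRecOn with
  | nil => rfl
  | append_singleton T x ih =>
      rw [List.foldl_append, ih, List.foldl_cons, List.foldl_nil, step_stateSpec]

theorem alt_nil {T : List String}
    (h : (PySem.List.enumerate T).filterMap
        (fun p => if PySem.Str.isIn "Transaction" p.2 then some p.1 else none) = []) :
    splitT_alt T = ([T.map PySem.Str.strip], 0) := by
  simp only [splitT_alt]
  rw [h]
  simp

theorem alt_cons {T : List String} {m' : Int} {rest' : List Int}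
    (h : (PySem.List.enumerate T).filterMap
        (fun p => if PySem.Str.isIn "Transaction" p.2 then some p.1 else none)
      = m' :: rest') :
    splitT_alt T =
      ((if 0 < m' then
          PySem.List.slice (T.map PySem.Str.strip) none (some m') ::
            ((m' :: rest').zip (rest' ++ [((T.map PySem.Str.strip).length : Int)])).map
              (fun p => PySem.List.slice (T.map PySem.Str.strip) (some p.1) (some p.2))
        else
          ((m' :: rest').zip (rest' ++ [((T.map PySem.Str.strip).length : Int)])).map
            (fun p => PySem.List.slice (T.map PySem.Str.strip) (some p.1) (some p.2))),
       ((m' :: rest').length : Int)) := by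
  simp only [splitT_alt]
  rw [h]

theorem splitT_eq_alt (T : List String) : splitT T = splitT_alt T := by
  cases h : marksNat T with
  | nil =>
      have hmarks : (PySem.List.enumerate T).filterMap
          (fun p => if PySem.Str.isIn "Transaction" p.2 then some p.1 else none) = [] := by
        rw [marks_eq_map_cast, h, List.map_nil]
      rw [alt_nil hmarks]
      simp only [splitT, foldA_char]
      rw [stateSpec_nil h]
      rfl
  | cons m rest =>
      have hmarks : (PySem.List.enumerate T).filterMap
          (fun p => if PySem.Str.isIn "Transaction" p.2 then some p.1 else none)
        = (m : Int) :: rest.map (fun (j : Nat) => (j : Int)) := by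
        rw [marks_eq_map_cast, h, List.map_cons]
      rw [alt_cons hmarks]
      simp only [splitT, foldA_char]
      rw [stateSpec_cons h]
      have hfold2 : (rest.map (fun (j : Nat) => (j : Int)) ++ [((T.map PySem.Str.strip).length : Int)])
          = (rest ++ [(T.map PySem.Str.strip).length]).map (fun (j : Nat) => (j : Int)) := by simp
      have hfold1 : ((m : Int) :: rest.map (fun (j : Nat) => (j : Int)))
          = (m :: rest).map (fun (j : Nat) => (j : Int)) := by simp
      rw [hfold2, hfold1, List.zip_map, zip_tail_snoc, List.map_map, List.map_append,
        List.map_cons, List.map_nil]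
      have hinner : ((m :: rest).zip rest).map
            ((fun p => PySem.List.slice (T.map PySem.Str.strip) (some p.1) (some p.2)) ∘
              Prod.map (fun (j : Nat) => (j : Int)) (fun (j : Nat) => (j : Int)))
          = innerOf (T.map PySem.Str.strip) m rest := by
        unfold innerOf
        refine List.map_congr_left ?_
        rintro ⟨a, b⟩ _
        simp [PySem.List.slice_natCast]
      have hlastpair : ((fun p => PySem.List.slice (T.map PySem.Str.strip) (some p.1) (some p.2)) ∘
            Prod.map (fun (j : Nat) => (j : Int)) (fun (j : Nat) => (j : Int)))
            ((m :: rest).getLast (by simp), (T.map PySem.Str.strip).length)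
          = (T.map PySem.Str.strip).drop ((m :: rest).getLast (by simp)) := by
        simp only [Function.comp_def, Prod.map_apply, PySem.List.slice_natCast]
        rw [← List.length_drop, List.take_length]
      rw [hinner, hlastpair, PySem.List.slice_to_natCast]
      by_cases hm : 0 < m <;>
        simp [leadOf, hm, Nat.cast_pos, List.append_assoc]

-- ===== VERDICT (by name: the statement is the Claim_ definition above) =====
theorem splitT_spec : Claim_equal_splitT := fun T _ => splitT_eq_alt T
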